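-- pv_equiv track=rewrite | github.com/SRUTIGUDURU/Capital_Coders_TechThrive | code.py | count_merchants
-- ===== SOURCE A (Python) =====
-- from collections import Counter
--
-- credit_card_offers = {
--     "Travel and Entertainment": {
--         "flights": "Get 20% off on your flight booking!",
--         "accommodations": "Get a free day of hotel stay!",
--         "travel aggregators": "Get up to 10% cashback!",
--         "theatres": "Get free tickets on your next movie visit!",
--         "amusement parks": "Buy 1 get 1 at your favourite water park!"
--     },
--     "Dining and Groceries": {
--         "restaurants": "Enjoy a gourmet dining experience!",
--         "delivery services": "Get free dessert with your next delivery!",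
--         "supermarkets": "Save 5% on your grocery bill!"
--     },
--     "Electronics and Gadgets": {
--         "electronic stores": "Exclusive Rs999 worth of gadgets at Rs450!",
--         "electronic appliance brands": "Get huge discounts on appliances!"
--     },
--     "Online Shopping": {
--         "online shopping stores": "Get a free voucher on your next purchase!",
--         "electronic stores": "Claim your Tech Shopper's Card!"
--     },
--     "Healthcare": {
--         "pharmacy": "Receive exclusive discounts on your medications!",
--         "hospitals": "Protect your health with our Health Protection Card!"
--     },
--     "Luxury and Jewelry": {
--         "jewellery": "Luxury Jewelry rewards just for you!",
--         "high-end goods": "Get exclusive high-end luxury items!",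
--         "watches": "Claim your premium watch offer!"
--     },
--     "Education and Learning": {
--         "educational websites": "E-learning cards with free resources!",
--         "softwares": "Get exclusive courses with Dorsera signup!",
--         "frameworks": "Tech Framework cashback!"
--     }
-- }
--
-- def count_merchants(transactions):
--     subcategory_count = Counter()
--     category_count = Counter()
--     for subcategory, merchant in transactions:
--         subcategory_count[subcategory] += 1
--         # Get category from subcategory
--         for category, subcat_dict in credit_card_offers.items():
--             if subcategory in subcat_dict:
--                 category_count[category] += 1
--     return subcategory_count, category_count
-- ===== SOURCE B (Python) =====
-- from collections import Counter
--
-- # Inverted index of the module's credit_card_offers table: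
-- # each subcategory -> tuple of categories whose offer dict contains it.
-- _SUBCAT_CATEGORIES = {
--     "flights": ("Travel and Entertainment",),
--     "accommodations": ("Travel and Entertainment",),
--     "travel aggregators": ("Travel and Entertainment",),
--     "theatres": ("Travel and Entertainment",),
--     "amusement parks": ("Travel and Entertainment",),
--     "restaurants": ("Dining and Groceries",),
--     "delivery services": ("Dining and Groceries",),
--     "supermarkets": ("Dining and Groceries",),
--     "electronic stores": ("Electronics and Gadgets", "Online Shopping"),
--     "electronic appliance brands": ("Electronics and Gadgets",),
--     "online shopping stores": ("Online Shopping",),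
--     "pharmacy": ("Healthcare",),
--     "hospitals": ("Healthcare",),
--     "jewellery": ("Luxury and Jewelry",),
--     "high-end goods": ("Luxury and Jewelry",),
--     "watches": ("Luxury and Jewelry",),
--     "educational websites": ("Education and Learning",),
--     "softwares": ("Education and Learning",),
--     "frameworks": ("Education and Learning",),
-- }
--
-- def count_merchants(transactions):
--     # pass 1: tally the subcategories in one go
--     subcategory_count = Counter(subcategory for subcategory, _merchant in transactions)
--     # pass 2: tally the containing categories via the inverted index
--     category_count = Counter()
--     for subcategory, _merchant in transactions:
--         for category in _SUBCAT_CATEGORIES.get(subcategory, ()):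
--             category_count[category] += 1
--     return subcategory_count, category_count
-- ===== Notes on version B (the rewrite author's own statement) =====
-- stated objective: alternative
-- what changed: B replaces A's single fused loop that scans all seven offer categories per transaction with two staged passes driven by a precomputed inverted index (subcategory -> containing categories): pass 1 builds the subcategory Counter in one comprehension, pass 2 tallies categories by a direct index lookup per transaction instead of scanning every category's subcategory dict.
import Mathlib
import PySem

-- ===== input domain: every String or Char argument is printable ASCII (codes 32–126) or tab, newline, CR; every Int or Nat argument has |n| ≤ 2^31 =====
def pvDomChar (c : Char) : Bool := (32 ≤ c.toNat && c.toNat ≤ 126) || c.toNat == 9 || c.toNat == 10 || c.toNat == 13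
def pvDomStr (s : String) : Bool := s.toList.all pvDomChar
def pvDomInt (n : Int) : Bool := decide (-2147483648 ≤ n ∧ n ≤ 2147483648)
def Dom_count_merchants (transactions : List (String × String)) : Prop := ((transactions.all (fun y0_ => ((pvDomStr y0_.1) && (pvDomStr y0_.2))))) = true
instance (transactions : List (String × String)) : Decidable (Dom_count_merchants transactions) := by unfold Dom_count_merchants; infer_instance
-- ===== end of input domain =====

-- B replaces A's fused loop (which scans every offer category for every transaction) by two
-- staged passes driven by a hardcoded inverted index subcategory -> containing categories
-- (objective: alternative).

-- ===== PORT A =====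
-- the module-level constant credit_card_offers (dict of dicts, insertion order)
def creditCardOffers : PySem.Dict String (PySem.Dict String String) := PySem.Dict.mk [
  ("Travel and Entertainment", PySem.Dict.mk [
    ("flights", "Get 20% off on your flight booking!"),
    ("accommodations", "Get a free day of hotel stay!"),
    ("travel aggregators", "Get up to 10% cashback!"),
    ("theatres", "Get free tickets on your next movie visit!"),
    ("amusement parks", "Buy 1 get 1 at your favourite water park!")]),
  ("Dining and Groceries", PySem.Dict.mk [
    ("restaurants", "Enjoy a gourmet dining experience!"),
    ("delivery services", "Get free dessert with your next delivery!"),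
    ("supermarkets", "Save 5% on your grocery bill!")]),
  ("Electronics and Gadgets", PySem.Dict.mk [
    ("electronic stores", "Exclusive Rs999 worth of gadgets at Rs450!"),
    ("electronic appliance brands", "Get huge discounts on appliances!")]),
  ("Online Shopping", PySem.Dict.mk [
    ("online shopping stores", "Get a free voucher on your next purchase!"),
    ("electronic stores", "Claim your Tech Shopper's Card!")]),
  ("Healthcare", PySem.Dict.mk [
    ("pharmacy", "Receive exclusive discounts on your medications!"),
    ("hospitals", "Protect your health with our Health Protection Card!")]),
  ("Luxury and Jewelry", PySem.Dict.mk [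
    ("jewellery", "Luxury Jewelry rewards just for you!"),
    ("high-end goods", "Get exclusive high-end luxury items!"),
    ("watches", "Claim your premium watch offer!")]),
  ("Education and Learning", PySem.Dict.mk [
    ("educational websites", "E-learning cards with free resources!"),
    ("softwares", "Get exclusive courses with Dorsera signup!"),
    ("frameworks", "Tech Framework cashback!")])]

-- one iteration of A's single fused loop: count the subcategory, then scan every category
def countStepA (st : PySem.Dict String Int × PySem.Dict String Int) (t : String × String) :
    PySem.Dict String Int × PySem.Dict String Int :=
  (st.1.modify t.1 0 (· + 1),
   creditCardOffers.items.foldl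
     (fun cc p => if p.2.contains t.1 then cc.modify p.1 0 (· + 1) else cc) st.2)

def count_merchants (transactions : List (String × String)) :
    (List (String × Int)) × (List (String × Int)) :=
  let r := transactions.foldl countStepA (PySem.Dict.empty, PySem.Dict.empty)
  (r.1.items, r.2.items)

-- ===== PORT B =====
-- the module-level literal _SUBCAT_CATEGORIES: inverted index subcategory -> categories
def subcatCats : PySem.Dict String (List String) := PySem.Dict.mk [
  ("flights", ["Travel and Entertainment"]),
  ("accommodations", ["Travel and Entertainment"]),
  ("travel aggregators", ["Travel and Entertainment"]),
  ("theatres", ["Travel and Entertainment"]),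
  ("amusement parks", ["Travel and Entertainment"]),
  ("restaurants", ["Dining and Groceries"]),
  ("delivery services", ["Dining and Groceries"]),
  ("supermarkets", ["Dining and Groceries"]),
  ("electronic stores", ["Electronics and Gadgets", "Online Shopping"]),
  ("electronic appliance brands", ["Electronics and Gadgets"]),
  ("online shopping stores", ["Online Shopping"]),
  ("pharmacy", ["Healthcare"]),
  ("hospitals", ["Healthcare"]),
  ("jewellery", ["Luxury and Jewelry"]),
  ("high-end goods", ["Luxury and Jewelry"]),
  ("watches", ["Luxury and Jewelry"]),
  ("educational websites", ["Education and Learning"]),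
  ("softwares", ["Education and Learning"]),
  ("frameworks", ["Education and Learning"])]

def count_merchants_alt (transactions : List (String × String)) :
    (List (String × Int)) × (List (String × Int)) :=
  -- pass 1: Counter(subcategory for subcategory, _merchant in transactions)
  let subCount := PySem.Dict.counter (transactions.map (·.1))
  -- pass 2: tally the containing categories via the inverted index
  let catCount := transactions.foldl
    (fun cc t => (subcatCats.getD t.1 []).foldl (fun cc c => cc.modify c 0 (· + 1)) cc)
    PySem.Dict.empty
  (subCount.items, catCount.items)

-- ===== PRECONDITION & SPEC =====
def Spec_count_merchants (transactions : List (String × String)) (out : (List (String × Int)) × (List (String × Int))) : Prop := out = count_merchants_alt transactions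
instance (transactions : List (String × String)) (out : (List (String × Int)) × (List (String × Int))) : Decidable (Spec_count_merchants transactions out) := by unfold Spec_count_merchants; infer_instance

-- ===== CLAIM (what is proved, stated in full; the proofs are below) =====
def Claim_equal_count_merchants : Prop := ∀ (transactions : List (String × String)), Dom_count_merchants transactions → Spec_count_merchants transactions (count_merchants transactions)

-- ===== LEMMAS AND PROOFS =====

-- A's fused loop over the pair state is the pair of the two independent loops
theorem foldl_pair_split (ts : List (String × String)) (d1 d2 : PySem.Dict String Int) :
    ts.foldl countStepA (d1, d2) =
      (ts.foldl (fun d t => d.modify t.1 0 (· + 1)) d1,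
       ts.foldl (fun cc t => creditCardOffers.items.foldl
         (fun cc p => if p.2.contains t.1 then cc.modify p.1 0 (· + 1) else cc) cc) d2) := by
  induction ts generalizing d1 d2 with
  | nil => rfl
  | cons t ts ih => simpa [List.foldl_cons, countStepA] using ih _ _

-- A's inner scan over all offer categories equals B's lookup in the inverted index
theorem scan_eq_lookup (s : String) (cc : PySem.Dict String Int) :
    creditCardOffers.items.foldl
      (fun cc p => if p.2.contains s then cc.modify p.1 0 (· + 1) else cc) cc
    = (subcatCats.getD s []).foldl (fun cc c => cc.modify c 0 (· + 1)) cc := by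
  by_cases h1 : s = "flights" <;> [skip; by_cases h2 : s = "accommodations"] <;>
    [skip; skip; by_cases h3 : s = "travel aggregators"] <;>
    [skip; skip; skip; by_cases h4 : s = "theatres"] <;>
    [skip; skip; skip; skip; by_cases h5 : s = "amusement parks"] <;>
    [skip; skip; skip; skip; skip; by_cases h6 : s = "restaurants"] <;>
    [skip; skip; skip; skip; skip; skip; by_cases h7 : s = "delivery services"] <;>
    [skip; skip; skip; skip; skip; skip; skip; by_cases h8 : s = "supermarkets"] <;>
    [skip; skip; skip; skip; skip; skip; skip; skip; by_cases h9 : s = "electronic stores"] <;>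
    [skip; skip; skip; skip; skip; skip; skip; skip; skip;
     by_cases h10 : s = "electronic appliance brands"] <;>
    [skip; skip; skip; skip; skip; skip; skip; skip; skip; skip;
     by_cases h11 : s = "online shopping stores"] <;>
    [skip; skip; skip; skip; skip; skip; skip; skip; skip; skip; skip;
     by_cases h12 : s = "pharmacy"] <;>
    [skip; skip; skip; skip; skip; skip; skip; skip; skip; skip; skip; skip;
     by_cases h13 : s = "hospitals"] <;>
    [skip; skip; skip; skip; skip; skip; skip; skip; skip; skip; skip; skip; skip;
     by_cases h14 : s = "jewellery"] <;>
    [skip; skip; skip; skip; skip; skip; skip; skip; skip; skip; skip; skip; skip; skip;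
     by_cases h15 : s = "high-end goods"] <;>
    [skip; skip; skip; skip; skip; skip; skip; skip; skip; skip; skip; skip; skip; skip; skip;
     by_cases h16 : s = "watches"] <;>
    [skip; skip; skip; skip; skip; skip; skip; skip; skip; skip; skip; skip; skip; skip; skip;
     skip; by_cases h17 : s = "educational websites"] <;>
    [skip; skip; skip; skip; skip; skip; skip; skip; skip; skip; skip; skip; skip; skip; skip;
     skip; skip; by_cases h18 : s = "softwares"] <;>
    [skip; skip; skip; skip; skip; skip; skip; skip; skip; skip; skip; skip; skip; skip; skip;
     skip; skip; skip; by_cases h19 : s = "frameworks"] <;>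
    first
    | (subst_vars; rfl)
    | simp [creditCardOffers, subcatCats, PySem.Dict.get?_mk_cons, List.foldl, PySem.Dict.contains,
        PySem.Dict.getD, PySem.Dict.get?, PySem.Dict.modify, PySem.Dict.keys,
        h1, h2, h3, h4, h5, h6, h7, h8, h9, h10, h11, h12, h13, h14, h15, h16, h17, h18, h19,
        Ne.symm h1, Ne.symm h2, Ne.symm h3, Ne.symm h4, Ne.symm h5, Ne.symm h6, Ne.symm h7,
        Ne.symm h8, Ne.symm h9, Ne.symm h10, Ne.symm h11, Ne.symm h12, Ne.symm h13, Ne.symm h14,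
        Ne.symm h15, Ne.symm h16, Ne.symm h17, Ne.symm h18, Ne.symm h19]

-- ===== VERDICT (by name: the statement is the Claim_ definition above) =====
theorem count_merchants_spec : Claim_equal_count_merchants := by
  intro ts _
  unfold Spec_count_merchants count_merchants count_merchants_alt
  rw [foldl_pair_split]
  refine congrArg₂ Prod.mk ?_ ?_
  · rw [PySem.Dict.counter_eq_foldl, List.foldl_map]
  · refine congrArg PySem.Dict.items ?_
    apply PySem.List.foldl_congr_mem
    intro cc t _
    exact scan_eq_lookup t.1 cc
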